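-- pv_equiv track=rewrite | github.com/jp81-tech/jp81-tech-jerry-hyperliquid-mm-bot-complete | scripts/daily_discord_report.py | parse_vpin
-- ===== SOURCE A (Python) =====
-- def parse_vpin(logs: str, pair: str) -> str:
--     for line in reversed(logs.split("\n")):
--         if f"VPIN: {pair}:" in line:
--             try:
--                 return line.split(f"VPIN: {pair}:")[1].split("|")[0].strip().split()[0]
--             except IndexError:
--                 pass
--     return "N/A"
-- ===== SOURCE B (Python) =====
-- def parse_vpin(logs: str, pair: str) -> str:
--     marker = f"VPIN: {pair}:"
--     result = "N/A"
--     for line in logs.split("\n"):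
--         if marker in line:
--             toks = line.split(marker)[1].split("|")[0].strip().split()
--             if toks:
--                 result = toks[0]
--     return result
-- ===== Notes on version B (the rewrite author's own statement) =====
-- stated objective: alternative
-- what changed: single forward pass with a last-match-wins string accumulator initialised to 'N/A' (overwritten on each successful extraction, guarded by a token-nonemptiness test) instead of reversing the line list, early-returning on the first hit and catching IndexError
import Mathlib
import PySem

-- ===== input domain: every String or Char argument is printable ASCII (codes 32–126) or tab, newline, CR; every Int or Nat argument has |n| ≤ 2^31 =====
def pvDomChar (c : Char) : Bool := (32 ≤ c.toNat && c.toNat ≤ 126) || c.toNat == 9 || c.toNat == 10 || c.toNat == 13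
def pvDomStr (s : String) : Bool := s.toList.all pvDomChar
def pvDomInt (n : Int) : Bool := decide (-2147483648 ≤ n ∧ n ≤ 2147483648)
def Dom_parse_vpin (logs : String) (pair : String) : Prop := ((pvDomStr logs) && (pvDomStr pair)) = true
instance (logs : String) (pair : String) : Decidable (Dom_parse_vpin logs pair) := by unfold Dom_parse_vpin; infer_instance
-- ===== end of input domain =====

-- B replaces A's reversed scan with early return and try/except by a single forward fold over the
-- lines with a last-match-wins accumulator (objective: alternative decomposition, same cost).

-- ===== PORT A =====
-- A's try-block: line.split(marker)[1].split("|")[0].strip().split()[0]; each indexing is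
-- pyGet? (none = the IndexError the except catches). The two str.split calls have nonempty
-- separators (marker starts with 'V', "|" is nonempty), so Str.split? is always `some`
-- and `.getD []` never supplies its default.
def pvExtractA (marker line : String) : Option String :=
  match PySem.List.pyGet? ((PySem.Str.split? line marker).getD []) 1 with
  | none => none
  | some s1 =>
    match PySem.List.pyGet? ((PySem.Str.split? s1 "|").getD []) 0 with
    | none => none
    | some s0 => PySem.List.pyGet? (PySem.Str.split₀ (PySem.Str.strip s0)) 0

-- the `for line in reversed(...)` loop: first success wins, `except IndexError: pass` recurses
def pvScanA (marker : String) : List String → String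
  | [] => "N/A"
  | line :: rest =>
    if PySem.Str.isIn marker line then
      match pvExtractA marker line with
      | some v => v
      | none => pvScanA marker rest
    else pvScanA marker rest

def parse_vpin (logs : String) (pair : String) : String :=
  let marker := "VPIN: " ++ pair ++ ":"
  pvScanA marker (((PySem.Str.split? logs "\n").getD []).reverse)

-- ===== PORT B =====
-- Source B's loop body, updating the accumulator `result`: under the `marker in line` guard the
-- subscripts [1] and [0] cannot raise (split by a nonempty contained/any separator gives
-- enough parts), so they are ported as List.getD; `if toks: result = toks[0]` is the match.
def pvStepB (marker : String) (result line : String) : String :=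
  if PySem.Str.isIn marker line then
    -- toks := line.split(marker)[1].split("|")[0].strip().split(); `if toks: result = toks[0]`
    match PySem.Str.split₀ (PySem.Str.strip
        (((PySem.Str.split? (((PySem.Str.split? line marker).getD []).getD 1 "") "|").getD []).getD 0 "")) with
    | t :: _ => t
    | [] => result
  else result

def parse_vpin_alt (logs : String) (pair : String) : String :=
  let marker := "VPIN: " ++ pair ++ ":"
  ((PySem.Str.split? logs "\n").getD []).foldl (pvStepB marker) "N/A"

-- ===== PRECONDITION & SPEC =====
def Spec_parse_vpin (logs : String) (pair : String) (out : String) : Prop := out = parse_vpin_alt logs pair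
instance (logs : String) (pair : String) (out : String) : Decidable (Spec_parse_vpin logs pair out) := by unfold Spec_parse_vpin; infer_instance

-- ===== CLAIM (what is proved, stated in full; the proofs are below) =====
def Claim_equal_parse_vpin : Prop := ∀ (logs : String) (pair : String), Dom_parse_vpin logs pair → Spec_parse_vpin logs pair (parse_vpin logs pair)

-- ===== LEMMAS AND PROOFS =====

-- the common "successful hit" of a line, used only by the proofs
def pvHit (marker line : String) : Option String :=
  if PySem.Str.isIn marker line then pvExtractA marker line else none

-- B's step is "overwrite by the hit if any"
theorem pvStepB_eq (marker result line : String) :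
    pvStepB marker result line = (pvHit marker line).getD result := by
  unfold pvStepB pvHit
  by_cases hin : PySem.Str.isIn marker line = true
  · rw [if_pos hin, if_pos hin]
    cases h1 : PySem.List.pyGet? ((PySem.Str.split? line marker).getD []) 1 with
    | none =>
      have e1 : ((PySem.Str.split? line marker).getD []).getD 1 "" = "" := by
        have := PySem.List.pyGet?_natCast ((PySem.Str.split? line marker).getD []) 1
        simp only [Nat.cast_one] at this
        rw [this] at h1
        simp [List.getD, h1]
      have hA : pvExtractA marker line = none := by simp only [pvExtractA, h1]
      rw [e1, hA]
      have hclosed : PySem.Str.split₀ (PySem.Str.strip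
          (((PySem.Str.split? "" "|").getD []).getD 0 "")) = ([] : List String) := by decide
      rw [hclosed]
      rfl
    | some s1 =>
      have e1 : ((PySem.Str.split? line marker).getD []).getD 1 "" = s1 := by
        have := PySem.List.pyGet?_natCast ((PySem.Str.split? line marker).getD []) 1
        simp only [Nat.cast_one] at this
        rw [this] at h1
        simp [List.getD, h1]
      cases h0 : PySem.List.pyGet? ((PySem.Str.split? s1 "|").getD []) 0 with
      | none =>
        have hA : pvExtractA marker line = none := by simp only [pvExtractA, h1, h0]
        rw [PySem.List.pyGet?_zero] at h0
        have e0 : ((PySem.Str.split? s1 "|").getD []).getD 0 "" = "" := by simp [List.getD, h0]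
        rw [e1, e0, hA]
        have hclosed : PySem.Str.split₀ (PySem.Str.strip "") = ([] : List String) := by decide
        rw [hclosed]
        rfl
      | some s0 =>
        have hA : pvExtractA marker line = (PySem.Str.split₀ (PySem.Str.strip s0)).head? := by
          simp only [pvExtractA, h1, h0]
          rw [PySem.List.pyGet?_zero, ← List.head?_eq_getElem?]
        rw [PySem.List.pyGet?_zero] at h0
        have e0 : ((PySem.Str.split? s1 "|").getD []).getD 0 "" = s0 := by simp [List.getD, h0]
        rw [e1, e0, hA]
        cases PySem.Str.split₀ (PySem.Str.strip s0) <;> rfl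
  · rw [if_neg hin, if_neg hin]; rfl

-- the forward fold keeps the LAST hit (or the initial accumulator)
theorem foldl_stepB_eq (marker : String) (lines : List String) (r : String) :
    lines.foldl (pvStepB marker) r = ((lines.filterMap (pvHit marker)).getLast?).getD r := by
  induction lines generalizing r with
  | nil => simp
  | cons line rest ih =>
    rw [List.foldl_cons, List.filterMap_cons, pvStepB_eq]
    cases h : pvHit marker line with
    | none => simp [ih]
    | some v =>
      rw [Option.getD_some, ih v, List.getLast?_cons]
      cases (rest.filterMap (pvHit marker)).getLast? <;> simp

-- A's reversed scan returns the FIRST hit of the list it walks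
theorem pvScanA_eq (marker : String) (lines : List String) :
    pvScanA marker lines = ((lines.filterMap (pvHit marker)).head?).getD "N/A" := by
  induction lines with
  | nil => simp [pvScanA]
  | cons line rest ih =>
    rw [pvScanA, List.filterMap_cons]
    unfold pvHit
    by_cases hin : PySem.Str.isIn marker line = true
    · rw [if_pos hin, if_pos hin]
      cases h : pvExtractA marker line with
      | none => simpa using ih
      | some v => simp
    · rw [if_neg hin, if_neg hin]
      simpa using ih

-- ===== VERDICT (by name: the statement is the Claim_ definition above) =====
theorem parse_vpin_spec : Claim_equal_parse_vpin := by
  intro logs pair _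
  show parse_vpin logs pair = parse_vpin_alt logs pair
  simp only [parse_vpin, parse_vpin_alt]
  rw [pvScanA_eq, foldl_stepB_eq, List.filterMap_reverse, List.head?_reverse]
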